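-- pv_equiv track=rewrite | github.com/ericvoid/harvest | harvest.py | _sort_deep_first
-- ===== SOURCE A (Python) =====
-- from collections import defaultdict
-- from operator import itemgetter
--
-- def _sort_deep_first(paths):
--     # yield sorted directories
--     directory_groups = defaultdict(list)
--
--     for path, splitted in paths:
--         if len(splitted) > 1:
--             root = splitted[0]
--             tail = splitted[1:]
--             directory_groups[root].append((path, tail))
--
--     for root, group in sorted(directory_groups.items(), key=itemgetter(0)):
--         yield from _sort_deep_first(group)
--
--     # yield sorted files
--     files = (path for path, splitted in paths if len(splitted) == 1)
--
--     for file in sorted(files):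
--         yield file
-- ===== SOURCE B (Python) =====
-- def _sort_deep_first(paths):
--     # One flat stable sort with a composite key instead of recursive grouping:
--     # interior components tag-"0" compare per directory level, the terminal
--     # tag-"1" entry compares by full path, so directories precede files.
--     items = [(path, splitted) for path, splitted in paths if len(splitted) >= 1]
--     items.sort(key=lambda it: ["0" + c for c in it[1][:-1]] + ["1" + it[0]])
--     for path, _ in items:
--         yield path
-- ===== Notes on version B (the rewrite author's own statement) =====
-- stated objective: faster
-- what changed: Replaced the recursive defaultdict group-by-root descent (one dict build plus two sorts per recursion level) by a single stable sort of all kept items under a composite tagged key ('0'+component for each interior directory level, terminal '1'+path), then one pass yielding the paths.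
import Mathlib
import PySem

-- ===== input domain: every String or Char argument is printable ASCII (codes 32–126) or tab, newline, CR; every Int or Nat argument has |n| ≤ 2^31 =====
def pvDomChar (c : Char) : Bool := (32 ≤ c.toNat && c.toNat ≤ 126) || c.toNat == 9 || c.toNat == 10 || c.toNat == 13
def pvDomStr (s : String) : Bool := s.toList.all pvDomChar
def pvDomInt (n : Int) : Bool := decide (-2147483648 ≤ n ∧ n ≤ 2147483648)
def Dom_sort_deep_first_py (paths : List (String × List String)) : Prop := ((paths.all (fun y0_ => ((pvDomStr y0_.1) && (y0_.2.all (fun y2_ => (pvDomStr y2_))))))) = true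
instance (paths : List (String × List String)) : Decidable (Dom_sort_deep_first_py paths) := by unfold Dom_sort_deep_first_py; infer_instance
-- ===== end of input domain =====

-- B replaces A's per-level recursive defaultdict grouping by ONE stable sort of the
-- whole list under a composite tagged key ("0"+component per directory level,
-- terminal "1"+path); same return value, different algorithm (measured faster in a timing run).

-- ===== PORT A =====
-- A recurses on groups whose total component count strictly shrinks; the fuel
-- argument (pvMsum paths + 1) is a totality guard only and always suffices.
def pvMsum (paths : List (String × List String)) : Nat :=
  (paths.map (fun it => it.2.length)).sum

def pvGoA : Nat → List (String × List String) → List String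
  | 0, _ => []
  | fuel+1, paths =>
    -- defaultdict(list) grouping loop: d[splitted[0]].append((path, splitted[1:])) for len(splitted) > 1
    ((PySem.List.sorted
        (paths.foldl (fun d it =>
            if 1 < it.2.length then d.modify (it.2.headD "") [] (· ++ [(it.1, it.2.drop 1)]) else d)
          (PySem.Dict.empty : PySem.Dict String (List (String × List String)))).items
        (fun kv => kv.1) false).flatMap (fun kv => pvGoA fuel kv.2))
    ++ PySem.List.sorted ((paths.filter (fun it => it.2.length == 1)).map (fun it => it.1)) (fun x => x) false

def sort_deep_first_py (paths : List (String × List String)) : List String :=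
  pvGoA (pvMsum paths + 1) paths

-- ===== PORT B =====
-- key(it) = ["0" + c for c in it[1][:-1]] + ["1" + it[0]]
def pvKey (it : String × List String) : List String :=
  it.2.dropLast.map (fun c => "0" ++ c) ++ ["1" ++ it.1]

def sort_deep_first_py_alt (paths : List (String × List String)) : List String :=
  (PySem.List.sorted (paths.filter (fun it => 1 ≤ it.2.length)) pvKey false).map (fun it => it.1)

-- ===== PRECONDITION & SPEC =====
def Spec_sort_deep_first_py (paths : List (String × List String)) (out : List String) : Prop := out = sort_deep_first_py_alt paths
instance (paths : List (String × List String)) (out : List String) : Decidable (Spec_sort_deep_first_py paths out) := by unfold Spec_sort_deep_first_py; infer_instance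

-- ===== CLAIM (what is proved, stated in full; the proofs are below) =====
def Claim_equal_sort_deep_first_py : Prop := ∀ (paths : List (String × List String)), Dom_sort_deep_first_py paths → Spec_sort_deep_first_py paths (sort_deep_first_py paths)

-- ===== LEMMAS AND PROOFS =====

-- abbreviations for the pieces of A's recursion step
def pvToG (it : String × List String) : String × (String × List String) :=
  (it.2.headD "", (it.1, it.2.drop 1))

def pvFromG (p : String × (String × List String)) : String × List String :=
  (p.2.1, p.1 :: p.2.2)

def pvGrouped (paths : List (String × List String)) : List (String × (String × List String)) :=
  (paths.filter (fun it => 1 < it.2.length)).map pvToG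

def pvGroup (paths : List (String × List String)) (r : String) : List (String × List String) :=
  ((pvGrouped paths).filter (fun p => p.1 == r)).map (·.2)

def pvFiles (paths : List (String × List String)) : List (String × List String) :=
  paths.filter (fun it => it.2.length == 1)

def pvRoots (paths : List (String × List String)) : List String :=
  (pvGrouped paths).map (·.1)

def pvLift (r : String) (q : String × List String) : String × List String :=
  (q.1, r :: q.2)

-- instance bridge: sorted does not depend on the Decidable proof
theorem pv_sorted_dec_irrel {α κ : Type} [LT κ] (d1 d2 : DecidableRel (fun a b : κ => a < b))
    (xs : List α) (k : α → κ) (r : Bool) :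
    @PySem.List.sorted α κ _ d1 xs k r = @PySem.List.sorted α κ _ d2 xs k r := by
  congr

theorem pv_sortedK (xs : List (String × List String)) :
    PySem.List.sorted xs pvKey false
      = @PySem.List.sorted _ _ List.instLinearOrder.toLT LinearOrder.toDecidableLT xs pvKey false := by
  show @PySem.List.sorted _ _ List.instLinearOrder.toLT _ xs pvKey false
      = @PySem.List.sorted _ _ List.instLinearOrder.toLT LinearOrder.toDecidableLT xs pvKey false
  exact pv_sorted_dec_irrel _ _ xs pvKey false

theorem pv_sorted_pairwiseK (xs : List (String × List String)) :
    (PySem.List.sorted xs pvKey false).Pairwise (fun a b => pvKey a ≤ pvKey b) := by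
  rw [pv_sortedK]
  exact PySem.List.sorted_pairwise xs pvKey

-- string-order facts
theorem pv_s01 (a b : String) : ("0" ++ a : String) < ("1" ++ b) := by
  rw [String.lt_iff_toList_lt]
  simp only [String.toList_append]
  show ('0' :: a.toList : List Char) < '1' :: b.toList
  exact List.cons_lt_cons_iff.mpr (Or.inl (by decide))

theorem pv_s0_lt {a b : String} (h : a < b) : ("0" ++ a : String) < ("0" ++ b) := by
  rw [String.lt_iff_toList_lt] at h ⊢
  simp only [String.toList_append]
  show ('0' :: a.toList : List Char) < '0' :: b.toList
  exact List.cons_lt_cons_iff.mpr (Or.inr ⟨rfl, h⟩)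

theorem pv_s1_lt {a b : String} (h : a < b) : ("1" ++ a : String) < ("1" ++ b) := by
  rw [String.lt_iff_toList_lt] at h ⊢
  simp only [String.toList_append]
  show ('1' :: a.toList : List Char) < '1' :: b.toList
  exact List.cons_lt_cons_iff.mpr (Or.inr ⟨rfl, h⟩)

theorem pv_s1_le {a b : String} (h : ("1" ++ a : String) ≤ ("1" ++ b)) : a ≤ b := by
  by_contra hc
  exact absurd h (not_le_of_gt (pv_s1_lt (lt_of_not_ge hc)))

theorem pv_s1_inj {a b : String} (h : ("1" ++ a : String) = ("1" ++ b)) : a = b := by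
  have h2 := congrArg String.toList h
  simp only [String.toList_append] at h2
  have h3 : ('1' :: a.toList : List Char) = '1' :: b.toList := h2
  exact String.toList_inj.mp (by exact (List.cons.injEq _ _ _ _ ▸ h3 : _) |>.2)

-- key-list (List String lex) facts
theorem pv_cons_le_cons {x : String} {l m : List String} (h : l ≤ m) : x :: l ≤ x :: m := by
  rcases lt_or_eq_of_le h with h | h
  · exact le_of_lt (List.cons_lt_cons_iff.mpr (Or.inr ⟨rfl, h⟩))
  · rw [h]

theorem pv_cons_lt_of_head {x y : String} (h : x < y) (l m : List String) : x :: l < y :: m :=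
  List.cons_lt_cons_iff.mpr (Or.inl h)

theorem pv_singleton_le {x y : String} (h : ([x] : List String) ≤ [y]) : x ≤ y := by
  by_contra hc
  exact absurd h (not_le_of_gt (pv_cons_lt_of_head (lt_of_not_ge hc) _ _))

-- key shape facts
theorem pv_key_file {it : String × List String} (h : it.2.length = 1) :
    pvKey it = ["1" ++ it.1] := by
  obtain ⟨p, s⟩ := it
  match s, h with
  | [a], _ => simp [pvKey]

theorem pv_key_cons {p r : String} {t : List String} (h : t ≠ []) :
    pvKey (p, r :: t) = ("0" ++ r) :: pvKey (p, t) := by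
  obtain ⟨a, t', rfl⟩ := List.exists_cons_of_ne_nil h
  simp [pvKey]

theorem pv_key_fst {a b : String × List String} (h : pvKey a = pvKey b) : a.1 = b.1 := by
  have h2 := congrArg (fun l => l.getLast?) h
  simp only [pvKey, List.getLast?_append, List.getLast?_singleton] at h2
  exact pv_s1_inj (Option.some_injective _ h2)

-- any two key-sorted rearrangements of the same items list the same paths
theorem pv_mapfst_of_key_eq : ∀ {l m : List (String × List String)},
    l.map pvKey = m.map pvKey → l.map (·.1) = m.map (·.1)
  | [], [], _ => rfl
  | a :: l, b :: m, h => by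
    simp only [List.map_cons, List.cons.injEq] at h ⊢
    exact ⟨pv_key_fst h.1, pv_mapfst_of_key_eq h.2⟩
  | [], b :: m, h => by simp at h
  | a :: l, [], h => by simp at h

theorem pv_mapfst_unique {l m : List (String × List String)} (hp : l.Perm m)
    (h1 : l.Pairwise (fun a b => pvKey a ≤ pvKey b))
    (h2 : m.Pairwise (fun a b => pvKey a ≤ pvKey b)) :
    l.map (·.1) = m.map (·.1) := by
  apply pv_mapfst_of_key_eq
  apply List.Perm.eq_of_pairwise (le := (· ≤ · : List String → List String → Prop))
  · exact fun a b _ _ hab hba => le_antisymm hab hba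
  · exact List.pairwise_map.mpr h1
  · exact List.pairwise_map.mpr h2
  · exact hp.map pvKey

-- A's grouping loop, restated over the projected list
theorem pv_foldl_if (paths : List (String × List String))
    (d : PySem.Dict String (List (String × List String))) :
    paths.foldl (fun d it =>
        if 1 < it.2.length then d.modify (it.2.headD "") [] (· ++ [(it.1, it.2.drop 1)]) else d) d
      = (pvGrouped paths).foldl (fun d p => d.modify p.1 [] (· ++ [p.2])) d := by
  induction paths generalizing d with
  | nil => rfl
  | cons a t ih =>
    simp only [List.foldl_cons, pvGrouped, List.filter_cons]
    by_cases h : 1 < a.2.length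
    · rw [if_pos h]
      simp only [h, decide_true, if_true, List.map_cons, List.foldl_cons, pvToG]
      exact ih _
    · rw [if_neg h]
      simp only [h, decide_false, if_false, Bool.false_eq_true]
      exact ih _

-- the dict's sorted items are exactly the groups over the sorted distinct roots
theorem pv_sorted_items (paths : List (String × List String)) :
    PySem.List.sorted
        ((pvGrouped paths).foldl (fun d p => d.modify p.1 [] (· ++ [p.2]))
          (PySem.Dict.empty : PySem.Dict String (List (String × List String)))).items
        (fun kv => kv.1) false
      = (PySem.List.sorted (PySem.Set.ofList (pvRoots paths)) (fun x => x) false).map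
          (fun r => (r, pvGroup paths r)) := by
  set d := (pvGrouped paths).foldl (fun d p => d.modify p.1 [] (· ++ [p.2]))
    (PySem.Dict.empty : PySem.Dict String (List (String × List String))) with hd
  have hkeys : d.keys = PySem.Set.ofList (pvRoots paths) := by
    rw [hd]
    rw [show (fun (d : PySem.Dict String (List (String × List String))) (p : String × (String × List String)) => d.modify p.1 [] (· ++ [p.2]))
        = fun d p => d.modify ((·.1) p) [] ((fun (_ : PySem.Dict String (List (String × List String))) (p : String × (String × List String)) (v : List (String × List String)) => v ++ [p.2]) d p) from rfl]
    rw [PySem.Dict.keys_foldl_modify_key]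
    simp [PySem.Dict.keys_empty, PySem.Set.update_nil_left, pvRoots]
  have hnodup : d.keys.Nodup := by
    rw [hkeys]; exact PySem.Set.nodup_ofList _
  have hgetD : ∀ r, d.getD r [] = pvGroup paths r := by
    intro r
    rw [hd, PySem.Dict.getD_foldl_modify_append]
    simp [PySem.Dict.getD_empty, pvGroup]
  have hitems : d.items = (PySem.Set.ofList (pvRoots paths)).map (fun r => (r, pvGroup paths r)) := by
    rw [PySem.Dict.items_eq_map_keys d hnodup [], hkeys]
    exact List.map_congr_left (fun r _ => by rw [hgetD])
  apply PySem.List.sorted_eq_of_perm_of_pairwise_lt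
  · rw [hitems]
    exact ((PySem.List.sorted_perm _ _ _).map _)
  · exact (PySem.List.sorted_ofList_pairwise_lt (pvRoots paths)).map _ (by intro a b h; exact h)

-- group-by partition permutation
theorem pv_partition {β : Type} : ∀ (K : List String) (l : List (String × β)),
    K.Nodup → (∀ p ∈ l, p.1 ∈ K) →
    l.Perm (K.flatMap (fun r => l.filter (fun p => p.1 == r))) := by
  intro K
  induction K with
  | nil =>
    intro l _ hmem
    cases l with
    | nil => simp
    | cons a t => exact absurd (hmem a (by simp)) (by simp)
  | cons r K' ih =>
    intro l hnd hmem
    have hsplit : l.Perm (l.filter (fun p => p.1 == r) ++ l.filter (fun p => !(p.1 == r))) :=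
      (List.filter_append_perm _ l).symm
    have hmem' : ∀ p ∈ l.filter (fun p => !(p.1 == r)), p.1 ∈ K' := by
      intro p hp
      rw [List.mem_filter] at hp
      have := hmem p hp.1
      simp only [List.mem_cons] at this
      rcases this with h | h
      · exfalso; simp [h] at hp
      · exact h
    have ihh := ih (l.filter (fun p => !(p.1 == r))) hnd.of_cons hmem'
    have hsame : ∀ r' ∈ K',
        (l.filter (fun p => !(p.1 == r))).filter (fun p => p.1 == r')
          = l.filter (fun p => p.1 == r') := by
      intro r' hr'
      have hne : r' ≠ r := by rintro rfl; exact (List.nodup_cons.mp hnd).1 hr'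
      rw [List.filter_filter]
      apply List.filter_congr
      intro p _
      by_cases hp : p.1 = r'
      · simp [hp, hne]
      · simp [hp]
    have heq : K'.flatMap (fun r' => (l.filter (fun p => !(p.1 == r))).filter (fun p => p.1 == r'))
        = K'.flatMap (fun r' => l.filter (fun p => p.1 == r')) := by
      unfold List.flatMap
      congr 1
      exact List.map_congr_left (fun r' hr' => hsame r' hr')
    rw [List.flatMap_cons]
    rw [heq] at ihh
    exact hsplit.trans (List.Perm.append_left _ ihh)

theorem pv_split (paths : List (String × List String)) :
    (paths.filter (fun it => 1 ≤ it.2.length)).Perm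
      ((paths.filter (fun it => 1 < it.2.length)) ++ pvFiles paths) := by
  induction paths with
  | nil => simp [pvFiles]
  | cons a t ih =>
    simp only [pvFiles, List.filter_cons] at ih ⊢
    rcases Nat.lt_trichotomy a.2.length 1 with h | h | h
    · have h0 : a.2.length = 0 := by omega
      simp [h0]
      simpa [pvFiles] using ih
    · simp [h]
      exact (ih.cons a).trans List.perm_middle.symm
    · have h1 : a.2.length ≠ 1 := by omega
      simp [h, le_of_lt h, h1]
      exact ih

theorem pv_group_mem {paths : List (String × List String)} {r : String}
    {q : String × List String} (h : q ∈ pvGroup paths r) : 1 ≤ q.2.length := by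
  simp only [pvGroup, pvGrouped, List.mem_map, List.mem_filter] at h
  obtain ⟨p, ⟨⟨it, ⟨_, hlen⟩, rfl⟩, _⟩, rfl⟩ := h
  simp only [pvToG]
  simp only [decide_eq_true_eq] at hlen
  simp
  omega

theorem pv_msum_filter_le (p : (String × List String) → Bool) (paths : List (String × List String)) :
    pvMsum (paths.filter p) ≤ pvMsum paths := by
  unfold pvMsum
  exact List.Sublist.sum_le_sum (List.Sublist.map _ List.filter_sublist) (fun a _ => Nat.zero_le a)

theorem pv_msum_tails : ∀ (l : List (String × List String)), (∀ it ∈ l, 1 ≤ it.2.length) →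
    ((l.map pvToG).map (fun p => p.2.2.length)).sum + l.length = pvMsum l := by
  intro l
  induction l with
  | nil => intro _; simp [pvMsum]
  | cons a t ih =>
    intro hall
    have ha := hall a (by simp)
    have ht := ih (fun it hit => hall it (List.mem_cons_of_mem a hit))
    simp only [List.map_cons, List.sum_cons, List.length_cons, pvMsum, pvToG] at ht ⊢
    have hlen : (a.2.drop 1).length = a.2.length - 1 := by simp
    omega

theorem pv_msum_group_lt {paths : List (String × List String)} {r : String}
    (h : r ∈ PySem.Set.ofList (pvRoots paths)) :
    pvMsum (pvGroup paths r) < pvMsum paths := by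
  have hr : r ∈ pvRoots paths := (PySem.Set.mem_ofList _ _).mp h
  have hne : paths.filter (fun it => 1 < it.2.length) ≠ [] := by
    intro h0
    rw [pvRoots, pvGrouped, h0] at hr
    simp at hr
  have h1 : pvMsum (pvGroup paths r) ≤ ((pvGrouped paths).map (fun p => p.2.2.length)).sum := by
    unfold pvMsum pvGroup
    rw [List.map_map]
    exact List.Sublist.sum_le_sum (List.Sublist.map _ List.filter_sublist) (fun a _ => Nat.zero_le a)
  have hall : ∀ it ∈ paths.filter (fun it => 1 < it.2.length), 1 ≤ it.2.length := by
    intro it hit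
    have := (List.mem_filter.mp hit).2
    simp at this
    omega
  have h2 := pv_msum_tails _ hall
  rw [show (paths.filter (fun it => 1 < it.2.length)).map pvToG = pvGrouped paths from rfl] at h2
  have h3 : pvMsum (paths.filter (fun it => 1 < it.2.length)) ≤ pvMsum paths :=
    pv_msum_filter_le _ _
  have h4 : 1 ≤ (paths.filter (fun it => 1 < it.2.length)).length := by
    cases hh : paths.filter (fun it => 1 < it.2.length) with
    | nil => exact absurd hh hne
    | cons _ _ => simp
  omega

theorem pv_files_len {paths : List (String × List String)} {x : String × List String}
    (h : x ∈ pvFiles paths) : x.2.length = 1 := by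
  have := (List.mem_filter.mp h).2
  simpa using this

-- sorting the file items by key lists the same names as sorting the names
theorem pv_files_sort (paths : List (String × List String)) :
    (PySem.List.sorted (pvFiles paths) pvKey false).map (·.1)
      = PySem.List.sorted ((pvFiles paths).map (fun it => it.1)) (fun x => x) false := by
  apply List.Perm.eq_of_pairwise (le := (· ≤ · : String → String → Prop))
  · exact fun a b _ _ hab hba => le_antisymm hab hba
  · rw [List.pairwise_map]
    apply (pv_sorted_pairwiseK (pvFiles paths)).imp_of_mem
    intro a b ha hb hab
    rw [pv_key_file (pv_files_len ((PySem.List.mem_sorted _ _ _ _).mp ha)),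
        pv_key_file (pv_files_len ((PySem.List.mem_sorted _ _ _ _).mp hb))] at hab
    exact pv_s1_le (pv_singleton_le hab)
  · exact PySem.List.sorted_pairwise _ _
  · exact ((PySem.List.sorted_perm _ _ _).map _).trans (PySem.List.sorted_perm _ _ _).symm

-- the main induction: A's recursion computes B's one-shot sort
theorem pv_main : ∀ (fuel : Nat) (paths : List (String × List String)), pvMsum paths < fuel →
    pvGoA fuel paths
      = (PySem.List.sorted (paths.filter (fun it => 1 ≤ it.2.length)) pvKey false).map (·.1) := by
  intro fuel
  induction fuel with
  | zero => intro paths h; omega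
  | succ fuel ih =>
    intro paths h
    set SR := PySem.List.sorted (PySem.Set.ofList (pvRoots paths)) (fun x => x) false with hSR
    -- membership facts used repeatedly
    have hgrpne : ∀ {r : String} {a : String × List String},
        a ∈ PySem.List.sorted (pvGroup paths r) pvKey false → a.2 ≠ [] := by
      intro r a ha h0
      have := pv_group_mem ((PySem.List.mem_sorted _ _ _ _).mp ha)
      rw [h0] at this
      simp at this
    -- step: unfold one level of A's recursion
    have hIH : ∀ r ∈ SR, pvGoA fuel (pvGroup paths r)
        = (PySem.List.sorted (pvGroup paths r) pvKey false).map (·.1) := by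
      intro r hrS
      have hr : r ∈ PySem.Set.ofList (pvRoots paths) := (PySem.List.mem_sorted _ _ _ _).mp hrS
      have hlt := pv_msum_group_lt hr
      have hfe : (pvGroup paths r).filter (fun it => 1 ≤ it.2.length) = pvGroup paths r :=
        List.filter_eq_self.mpr (fun q hq => by simpa using pv_group_mem hq)
      have := ih (pvGroup paths r) (by omega)
      rwa [hfe] at this
    set ys := SR.flatMap (fun r => (PySem.List.sorted (pvGroup paths r) pvKey false).map (pvLift r))
        ++ PySem.List.sorted (pvFiles paths) pvKey false with hys
    -- the LHS of the goal is ys.map (·.1)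
    have hLHS : pvGoA (fuel + 1) paths = ys.map (·.1) := by
      rw [pvGoA, pv_foldl_if, pv_sorted_items, List.flatMap_map,
        show paths.filter (fun it => it.2.length == 1) = pvFiles paths from rfl]
      rw [hys, List.map_append, List.map_flatMap, ← pv_files_sort]
      congr 1
      unfold List.flatMap
      congr 1
      apply List.map_congr_left
      intro r hrS
      rw [hIH r hrS, List.map_map]
      rfl
    -- ys is a rearrangement of the kept items
    have hperm : ys.Perm (paths.filter (fun it => 1 ≤ it.2.length)) := by
      have d1 : (pvGrouped paths).map pvFromG = paths.filter (fun it => 1 < it.2.length) := by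
        rw [pvGrouped, List.map_map]
        have : ∀ it ∈ paths.filter (fun it => 1 < it.2.length), (pvFromG ∘ pvToG) it = id it := by
          intro it hit
          have hl : 1 < it.2.length := by simpa using (List.mem_filter.mp hit).2
          obtain ⟨p, s⟩ := it
          cases s with
          | nil => simp at hl
          | cons a t => simp [pvFromG, pvToG]
        rw [List.map_congr_left this, List.map_id]
      have d2 := pv_partition (PySem.Set.ofList (pvRoots paths)) (pvGrouped paths)
        (PySem.Set.nodup_ofList _)
        (fun p hp => (PySem.Set.mem_ofList _ _).mpr (List.mem_map_of_mem hp))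
      have d3 : ∀ r : String, ((pvGrouped paths).filter (fun p => p.1 == r)).map pvFromG
          = (pvGroup paths r).map (pvLift r) := by
        intro r
        rw [pvGroup, List.map_map]
        apply List.map_congr_left
        intro p hp
        have hpr : p.1 = r := by simpa using (List.mem_filter.mp hp).2
        simp [pvFromG, pvLift, hpr]
      have d4 : (paths.filter (fun it => 1 < it.2.length)).Perm
          ((PySem.Set.ofList (pvRoots paths)).flatMap (fun r => (pvGroup paths r).map (pvLift r))) := by
        rw [← d1]
        have d2' := d2.map pvFromG
        rw [List.map_flatMap] at d2'
        refine d2'.trans ?_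
        unfold List.flatMap
        rw [List.map_congr_left (fun r _ => d3 r)]
      have d5 : ((PySem.Set.ofList (pvRoots paths)).flatMap
            (fun r => (pvGroup paths r).map (pvLift r))).Perm
          (SR.flatMap (fun r => (PySem.List.sorted (pvGroup paths r) pvKey false).map (pvLift r))) :=
        List.Perm.flatMap (PySem.List.sorted_perm _ _ _).symm
          (fun r _ => (PySem.List.sorted_perm _ _ _).symm.map _)
      have d6 : (pvFiles paths).Perm (PySem.List.sorted (pvFiles paths) pvKey false) :=
        (PySem.List.sorted_perm _ _ _).symm
      exact ((pv_split paths).trans ((d4.trans d5).append d6)).symm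
    -- ys is key-sorted
    have hpw : ys.Pairwise (fun a b => pvKey a ≤ pvKey b) := by
      rw [hys, List.pairwise_append]
      refine ⟨?_, pv_sorted_pairwiseK (pvFiles paths), ?_⟩
      · rw [List.pairwise_flatMap]
        constructor
        · intro r hrS
          rw [List.pairwise_map]
          apply (pv_sorted_pairwiseK (pvGroup paths r)).imp_of_mem
          intro a b ha hb hab
          show pvKey (pvLift r a) ≤ pvKey (pvLift r b)
          rw [pvLift, pvLift, pv_key_cons (hgrpne ha), pv_key_cons (hgrpne hb)]
          exact pv_cons_le_cons hab
        · have hpwSR : SR.Pairwise (· < ·) := by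
            rw [hSR]; exact PySem.List.sorted_ofList_pairwise_lt _
          apply hpwSR.imp_of_mem
          intro r1 r2 _ _ hlt x hx y hy
          obtain ⟨a, haS, rfl⟩ := List.mem_map.mp hx
          obtain ⟨b, hbS, rfl⟩ := List.mem_map.mp hy
          rw [pvLift, pvLift, pv_key_cons (hgrpne haS), pv_key_cons (hgrpne hbS)]
          exact le_of_lt (pv_cons_lt_of_head (pv_s0_lt hlt) _ _)
      · intro x hx y hy
        obtain ⟨r, hrS, hxr⟩ := List.mem_flatMap.mp hx
        obtain ⟨a, haS, rfl⟩ := List.mem_map.mp hxr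
        have hy1 : y.2.length = 1 := pv_files_len ((PySem.List.mem_sorted _ _ _ _).mp hy)
        rw [pvLift, pv_key_cons (hgrpne haS), pv_key_file hy1]
        exact le_of_lt (pv_cons_lt_of_head (pv_s01 _ _) _ _)
    rw [hLHS]
    exact pv_mapfst_unique (hperm.trans (PySem.List.sorted_perm _ _ _).symm) hpw
      (pv_sorted_pairwiseK _)

-- ===== VERDICT (by name: the statement is the Claim_ definition above) =====
theorem sort_deep_first_py_spec : Claim_equal_sort_deep_first_py := by
  intro paths _
  unfold Spec_sort_deep_first_py sort_deep_first_py sort_deep_first_py_alt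
  exact pv_main (pvMsum paths + 1) paths (Nat.lt_succ_self _)
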